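-- pv_equiv track=rewrite | github.com/lb1224-icl/L-LUT-to-P-LUT-Synthesis | src/decompose/clut.py | _cluster_subtables
-- ===== SOURCE A (Python) =====
-- from typing import List, Tuple
--
-- def _similarity_matrix(subtables: List[List[int]], out_width: int, max_shift: int) -> List[List[int]]:
--     # sm[i][j] = smallest t such that ST_i >> t == ST_j, else -1
--     n = len(subtables)
--     sm = [[-1] * n for _ in range(n)]
--     for i in range(n):
--         for j in range(n):
--             for t in range(max_shift + 1):
--                 if all((subtables[i][k] >> t) == subtables[j][k] for k in range(len(subtables[i]))):
--                     sm[i][j] = t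
--                     break
--     return sm
--
-- def _cluster_subtables(values: List[int], out_width: int, ws: int, max_shift: int):
--     # Partition Td into sub-tables of size 2^ws and cluster by right-shift similarity
--     group = 1 << ws
--     num_sub = len(values) // group
--     subtables = [values[i * group : (i + 1) * group] for i in range(num_sub)]
--
--     remaining_ids = list(range(num_sub))
--     ust: List[List[int]] = []
--     tidx = [0] * num_sub
--     trsh = [0] * num_sub
--
--     while remaining_ids:
--         subset = [subtables[i] for i in remaining_ids]
--         sm = _similarity_matrix(subset, out_width, max_shift)
--
--         best_local = None
--         best_cnt = -1
--         for i in range(len(remaining_ids)):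
--             cnt = sum(1 for j in range(len(remaining_ids)) if sm[i][j] != -1)
--             if cnt > best_cnt:
--                 best_cnt = cnt
--                 best_local = i
--
--         gen_global = remaining_ids[best_local]
--         ust_idx = len(ust)
--         ust.append(subtables[gen_global])
--
--         to_remove: List[int] = []
--         for j_local, j_global in enumerate(remaining_ids):
--             if sm[best_local][j_local] != -1:
--                 tidx[j_global] = ust_idx
--                 trsh[j_global] = sm[best_local][j_local]
--                 to_remove.append(j_global)
--
--         remaining_ids = [g for g in remaining_ids if g not in to_remove]
--
--     return ust, tidx, trsh, group
-- ===== SOURCE B (Python) =====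
-- from typing import List
--
-- def _cluster_subtables(values: List[int], out_width: int, ws: int, max_shift: int):
--     # Precompute the full shift-similarity matrix once over all subtables and
--     # index it by global id in each greedy round, instead of rebuilding it on
--     # the shrinking subset every iteration; subtables are peeled off the front
--     # of the value list, the matched ids of a round are filtered out in one pass.
--     group = 1 << ws
--     num_sub = len(values) // group
--
--     subtables: List[List[int]] = []
--     rest = values[: num_sub * group]
--     while rest:
--         subtables.append(rest[:group])
--         rest = rest[group:]
--
--     def shift_of(a: List[int], b: List[int]) -> int:
--         t = 0
--         while t <= max_shift:
--             if all((x >> t) == y for x, y in zip(a, b)):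
--                 return t
--             t += 1
--         return -1
--
--     sm = [[shift_of(a, b) for b in subtables] for a in subtables]
--
--     ust: List[List[int]] = []
--     tidx = [0] * num_sub
--     trsh = [0] * num_sub
--     remaining = list(range(num_sub))
--     while remaining:
--         best = max(remaining, key=lambda i: len([j for j in remaining if sm[i][j] != -1]))
--         matched = [g for g in remaining if sm[best][g] != -1]
--         idx = len(ust)
--         ust.append(subtables[best])
--         for g in matched:
--             tidx[g] = idx
--             trsh[g] = sm[best][g]
--         remaining = [g for g in remaining if sm[best][g] == -1]
--     return ust, tidx, trsh, group
-- ===== Notes on version B (the rewrite author's own statement) =====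
-- stated objective: alternative
-- what changed: B computes the right-shift similarity matrix once over all subtables and indexes it by global id in each greedy round (first-max pick, staged filter/update passes, subtables peeled off the front of the list), instead of rebuilding the whole matrix on the shrinking subset at every iteration as A does.
import Mathlib
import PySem

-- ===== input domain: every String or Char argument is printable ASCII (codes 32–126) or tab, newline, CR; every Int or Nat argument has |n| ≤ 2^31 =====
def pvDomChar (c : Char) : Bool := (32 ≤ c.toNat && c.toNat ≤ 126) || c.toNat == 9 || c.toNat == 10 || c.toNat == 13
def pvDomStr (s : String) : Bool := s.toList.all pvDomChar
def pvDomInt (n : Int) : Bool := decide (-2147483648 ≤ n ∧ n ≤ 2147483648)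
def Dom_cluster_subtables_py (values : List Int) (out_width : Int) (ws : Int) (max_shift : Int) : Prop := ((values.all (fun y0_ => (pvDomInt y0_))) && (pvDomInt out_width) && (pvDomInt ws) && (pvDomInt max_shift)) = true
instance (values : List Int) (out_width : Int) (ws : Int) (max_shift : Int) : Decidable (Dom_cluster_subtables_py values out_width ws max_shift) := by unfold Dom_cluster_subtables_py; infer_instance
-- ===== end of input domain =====

-- B precomputes the shift-similarity matrix once over all subtables and indexes it by
-- global id each greedy round (first-max pick, staged filter/update passes), instead of
-- rebuilding the matrix on the shrinking subset every iteration as A does — same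
-- return value on Pre_.

-- ===== PORT A =====

-- inner 'for t in range(max_shift + 1): if all(...): sm[i][j] = t; break' of
-- _similarity_matrix: first t with the property, else the preset -1
def pvFindShiftA (a b : List Int) (max_shift : Int) : Int :=
  match (PySem.List.pyRange 0 (max_shift + 1)).find? (fun t =>
      (PySem.List.pyRange 0 (PySem.List.len a)).all (fun k =>
        -- subtables[i][k] >> t == subtables[j][k]; the default 0 of pyGetD is never
        -- read: Python indexes k < len(subtables[i]) and both rows have equal length
        PySem.List.pyGetD a k 0 >>> t.toNat == PySem.List.pyGetD b k 0)) with
  | some t => t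
  | none => -1

-- _similarity_matrix(subtables, out_width, max_shift)
def pvSimilarityMatrixA (subtables : List (List Int)) (out_width : Int) (max_shift : Int) : List (List Int) :=
  let n : Int := PySem.List.len subtables
  (PySem.List.pyRange 0 n).map (fun i =>
    (PySem.List.pyRange 0 n).map (fun j =>
      pvFindShiftA (PySem.List.pyGetD subtables i []) (PySem.List.pyGetD subtables j []) max_shift))

-- the 'while remaining_ids:' loop of A; fuel only makes the recursion structural
-- (fuel = initial number of ids suffices whenever the Python loop terminates)
def pvLoopA (subtables : List (List Int)) (out_width max_shift : Int) :
    Nat → List Int → List (List Int) → List Int → List Int →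
    List (List Int) × List Int × List Int
  | 0, _, ust, tidx, trsh => (ust, tidx, trsh)
  | fuel + 1, rem, ust, tidx, trsh =>
    if rem = [] then (ust, tidx, trsh)
    else
      let subset := rem.map (fun g => PySem.List.pyGetD subtables g [])
      let sm := pvSimilarityMatrixA subset out_width max_shift
      let m : Int := PySem.List.len rem
      -- best_local / best_cnt selection loop (best_local = None ↦ none)
      let acc := (PySem.List.pyRange 0 m).foldl
        (fun (acc : Int × Option Int) i =>
          let cnt := ((PySem.List.pyRange 0 m).map (fun j =>
            if PySem.List.pyGetD (PySem.List.pyGetD sm i []) j (-1) ≠ -1 then (1 : Int) else 0)).sum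
          if cnt > acc.1 then (cnt, some i) else acc) (-1, none)
      match acc.2 with
      | none => (ust, tidx, trsh)  -- unreachable for rem ≠ []: the first index always wins over -1
      | some bl =>
        let gen := PySem.List.pyGetD rem bl 0
        let ust_idx : Int := PySem.List.len ust
        let ust' := ust ++ [PySem.List.pyGetD subtables gen []]
        let st := (PySem.List.enumerate rem).foldl
          (fun (s : List Int × List Int × List Int) p =>
            let t := PySem.List.pyGetD (PySem.List.pyGetD sm bl []) p.1 (-1)
            if t ≠ -1 then
              (PySem.List.pySetD s.1 p.2 ust_idx, PySem.List.pySetD s.2.1 p.2 t, s.2.2 ++ [p.2])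
            else s) (tidx, trsh, [])
        let rem' := rem.filter (fun g => !(st.2.2.contains g))
        pvLoopA subtables out_width max_shift fuel rem' ust' st.1 st.2.1

def cluster_subtables_py (values : List Int) (out_width : Int) (ws : Int) (max_shift : Int) : List (List Int) × List Int × List Int × Int :=
  let group : Int := 1 <<< ws.toNat   -- 1 << ws; Python raises ValueError for ws < 0 (outside Pre_)
  let num_sub := PySem.Int.floordiv (PySem.List.len values) group
  let subtables := (PySem.List.pyRange 0 num_sub).map (fun i =>
      PySem.List.slice values (some (i * group)) (some ((i + 1) * group)))
  let rem0 := PySem.List.pyRange 0 num_sub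
  let tidx0 := List.replicate num_sub.toNat (0 : Int)   -- [0] * num_sub
  let trsh0 := List.replicate num_sub.toNat (0 : Int)
  let r := pvLoopA subtables out_width max_shift rem0.length rem0 [] tidx0 trsh0
  (r.1, r.2.1, r.2.2, group)

-- ===== PORT B =====

-- 'while t <= max_shift: … t += 1' of shift_of in Source B; fuel counts the remaining
-- iterations, (max_shift + 1 - t).toNat, so fuel = 0 exactly when t > max_shift
def pvShiftGoB (a b : List Int) : Int → Nat → Int
  | _, 0 => -1
  | t, f + 1 =>
    if (a.zip b).all (fun pr => pr.1 >>> ((t.toNat : Nat) : Int) == pr.2) then t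
    else pvShiftGoB a b (t + 1) f

def pvShiftOfB (max_shift : Int) (a b : List Int) : Int :=
  pvShiftGoB a b 0 (max_shift + 1).toNat

-- 'while rest: subtables.append(rest[:group]); rest = rest[group:]' of Source B;
-- rest[group:] on a nonempty rest is xs.drop (group - 1) (group = 1 << ws ≥ 1 always)
def pvChunksB (group : Nat) : List Int → List (List Int)
  | [] => []
  | x :: xs => ((x :: xs).take group) :: pvChunksB group (xs.drop (group - 1))
  termination_by l => l.length
  decreasing_by simp [List.length_drop]

-- the 'while remaining:' loop of Source B over the ONE precomputed global matrix sm
def pvLoopB (subtables sm : List (List Int)) :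
    Nat → List Int → List (List Int) → List Int → List Int →
    List (List Int) × List Int × List Int
  | 0, _, ust, tidx, trsh => (ust, tidx, trsh)
  | fuel + 1, rem, ust, tidx, trsh =>
    -- max(remaining, key=...): first element with maximal key; none ↔ remaining empty
    match PySem.List.max? rem (fun i =>
        (((rem.filter (fun j =>
            decide (PySem.List.pyGetD (PySem.List.pyGetD sm i []) j (-1) ≠ -1))).length : Nat) : Int)) with
    | none => (ust, tidx, trsh)
    | some best =>
      let row := PySem.List.pyGetD sm best []
      let matched := rem.filter (fun g => decide (PySem.List.pyGetD row g (-1) ≠ -1))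
      let idx : Int := PySem.List.len ust
      let ust' := ust ++ [PySem.List.pyGetD subtables best []]
      let p := matched.foldl
        (fun (s : List Int × List Int) g =>
          (PySem.List.pySetD s.1 g idx, PySem.List.pySetD s.2 g (PySem.List.pyGetD row g (-1))))
        (tidx, trsh)
      let rem' := rem.filter (fun g => decide (PySem.List.pyGetD row g (-1) = -1))
      pvLoopB subtables sm fuel rem' ust' p.1 p.2

def cluster_subtables_py_alt (values : List Int) (out_width : Int) (ws : Int) (max_shift : Int) : List (List Int) × List Int × List Int × Int :=
  let group : Int := 1 <<< ws.toNat   -- 1 << ws; Python raises ValueError for ws < 0 (outside Pre_)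
  let num_sub := PySem.Int.floordiv (PySem.List.len values) group
  let subtables := pvChunksB group.toNat (PySem.List.slice values none (some (num_sub * group)))
  let sm := subtables.map (fun a => subtables.map (fun b => pvShiftOfB max_shift a b))
  let rem0 := PySem.List.pyRange 0 num_sub
  let tidx0 := List.replicate num_sub.toNat (0 : Int)
  let trsh0 := List.replicate num_sub.toNat (0 : Int)
  let r := pvLoopB subtables sm rem0.length rem0 [] tidx0 trsh0
  (r.1, r.2.1, r.2.2, group)

-- ===== PRECONDITION & SPEC =====
-- Pre_ excludes ws < 0 (Python raises ValueError on '1 << ws') and max_shift < 0 when at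
-- least one complete subtable exists (the while loop then never removes anything and
-- spins forever); on every other input A returns normally.
def Pre_cluster_subtables_py (values : List Int) (out_width : Int) (ws : Int) (max_shift : Int) : Prop :=
  0 ≤ ws ∧ (0 ≤ max_shift ∨ (values.length : Int) < 1 <<< ws.toNat)
instance (values : List Int) (out_width : Int) (ws : Int) (max_shift : Int) : Decidable (Pre_cluster_subtables_py values out_width ws max_shift) := by unfold Pre_cluster_subtables_py; infer_instance

def pvWitness_cluster_subtables_py : List Int × Int × Int × Int := ([6, 3, 12, 6], 4, 1, 2)

def Spec_cluster_subtables_py (values : List Int) (out_width : Int) (ws : Int) (max_shift : Int) (out : List (List Int) × List Int × List Int × Int) : Prop := out = cluster_subtables_py_alt values out_width ws max_shift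
instance (values : List Int) (out_width : Int) (ws : Int) (max_shift : Int) (out : List (List Int) × List Int × List Int × Int) : Decidable (Spec_cluster_subtables_py values out_width ws max_shift out) := by unfold Spec_cluster_subtables_py; infer_instance

-- ===== CLAIM (what is proved, stated in full; the proofs are below) =====
def Claim_equal_cluster_subtables_py : Prop := ∀ (values : List Int) (out_width : Int) (ws : Int) (max_shift : Int), Dom_cluster_subtables_py values out_width ws max_shift → Pre_cluster_subtables_py values out_width ws max_shift → Spec_cluster_subtables_py values out_width ws max_shift (cluster_subtables_py values out_width ws max_shift)

-- ===== LEMMAS AND PROOFS =====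

-- all-check of A (index loop) = all-check of B (zip) on equal-length rows
theorem pv_all_eq (a b : List Int) (h : a.length = b.length) (s : Int) :
    ((PySem.List.pyRange 0 (PySem.List.len a)).all (fun k =>
        PySem.List.pyGetD a k 0 >>> s == PySem.List.pyGetD b k 0))
      = (a.zip b).all (fun p => p.1 >>> s == p.2) := by
  rw [PySem.List.len_eq, PySem.List.pyRange_zero_natCast, List.all_map]
  induction a generalizing b with
  | nil => simp
  | cons x xs ih =>
    cases b with
    | nil => simp at h
    | cons y ys =>
      rw [List.length_cons, List.range_succ_eq_map]
      simp only [List.all_cons, List.all_map, List.zip_cons_cons, Function.comp_def,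
        PySem.List.pyGetD_natCast, List.getD_cons_zero, List.getD_cons_succ,
        Nat.succ_eq_add_one]
      rw [← ih ys (by simpa using h)]
      simp [Function.comp_def, PySem.List.pyGetD_natCast]

-- B's while-counter recursion = first match of the scanned range
theorem pv_shiftgo_eq (a b : List Int) :
    ∀ (f t0 : Nat),
      pvShiftGoB a b (↑t0) f
        = (match ((List.range' t0 f).map (fun k : Nat => (↑k : Int))).find?
              (fun t => (a.zip b).all (fun pr => pr.1 >>> t.toNat == pr.2)) with
           | some t => t
           | none => -1) := by
  intro f
  induction f with
  | zero => intro t0; simp [pvShiftGoB]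
  | succ f ih =>
    intro t0
    rw [List.range'_succ, List.map_cons, List.find?_cons]
    simp only [pvShiftGoB]
    by_cases hx : ((a.zip b).all (fun pr => pr.1 >>> ((((t0 : Int)).toNat : Nat) : Int) == pr.2)) = true
    · rw [if_pos hx, hx]
    · simp only [Bool.not_eq_true] at hx
      rw [if_neg (by rw [hx]; exact Bool.false_ne_true), hx]
      rw [show ((t0 : Int) + 1) = ((t0 + 1 : Nat) : Int) by push_cast; ring]
      exact ih (t0 + 1)

theorem pv_findshift_eq (a b : List Int) (h : a.length = b.length) (ms : Int) (hms : 0 ≤ ms) :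
    pvFindShiftA a b ms = pvShiftOfB ms a b := by
  unfold pvFindShiftA pvShiftOfB
  have he : (fun t : Int =>
      (PySem.List.pyRange 0 (PySem.List.len a)).all (fun k =>
        PySem.List.pyGetD a k 0 >>> (↑t.toNat : Int) == PySem.List.pyGetD b k 0))
      = (fun t : Int => (a.zip b).all (fun pr => pr.1 >>> (↑t.toNat : Int) == pr.2)) := by
    funext t; exact pv_all_eq a b h ↑t.toNat
  rw [he]
  rw [show ms + 1 = (((ms + 1).toNat : Nat) : Int) by omega, PySem.List.pyRange_zero_natCast]
  simp only [Int.toNat_natCast]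
  rw [show (0 : Int) = ((0 : Nat) : Int) by norm_num, pv_shiftgo_eq a b (ms + 1).toNat 0]
  rw [List.range_eq_range']

theorem pv_map_getD_range {α β : Type} (l : List α) (d : α) (H : α → β) :
    (List.range l.length).map (fun j => H (l.getD j d)) = l.map H := by
  apply List.ext_getElem
  · simp
  · intro i h1 h2
    simp [List.getElem?_eq_getElem (show i < l.length by simpa using h1)]

theorem pv_foldl_getD_range {α β : Type} (l : List α) (d : α) (K : β → α → β) (init : β) :
    (List.range l.length).foldl (fun s j => K s (l.getD j d)) init = l.foldl K init := by
  rw [← List.foldl_map (f := fun j => l.getD j d) (g := K)]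
  rw [show (List.range l.length).map (fun j => l.getD j d) = l.map id from pv_map_getD_range l d id]
  simp

-- a Prop-test 0/1 sum is the length of the corresponding filter
theorem pv_sum_ite_eq_filter_len (l : List Int) (Q : Int → Prop) [DecidablePred Q] :
    (l.map (fun g => if Q g then (1 : Int) else 0)).sum
      = (((l.filter (fun g => decide (Q g))).length : Nat) : Int) := by
  rw [← List.countP_eq_length_filter, ← PySem.List.sum_map_ite_one_zero (fun g => decide (Q g)) l]
  simp

-- entry of B's precomputed global matrix at valid ids
theorem pv_smB_entry (subtables : List (List Int)) (ms g h : Int)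
    (hg : 0 ≤ g ∧ g < (subtables.length : Int)) (hh : 0 ≤ h ∧ h < (subtables.length : Int)) :
    PySem.List.pyGetD (PySem.List.pyGetD
        (subtables.map (fun a => subtables.map (fun b => pvShiftOfB ms a b))) g []) h (-1)
      = pvShiftOfB ms (subtables.getD g.toNat []) (subtables.getD h.toNat []) := by
  have hg' : g.toNat < subtables.length := by omega
  have hh' : h.toNat < subtables.length := by omega
  rw [PySem.List.pyGetD_of_nonneg _ _ hg.1]
  rw [List.getD_eq_getElem _ _ (by simpa using hg'), List.getElem_map]
  rw [PySem.List.pyGetD_of_nonneg _ _ hh.1]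
  rw [List.getD_eq_getElem _ _ (by simpa using hh'), List.getElem_map]
  rw [List.getD_eq_getElem _ _ hg', List.getD_eq_getElem _ _ hh']

-- entry of A's per-iteration local matrix at local indices
theorem pv_smL_entry (subtables : List (List Int)) (rem : List Int) (ow ms : Int)
    (i j : Nat) (hi : i < rem.length) (hj : j < rem.length) :
    PySem.List.pyGetD (PySem.List.pyGetD
        (pvSimilarityMatrixA (rem.map (fun g => PySem.List.pyGetD subtables g [])) ow ms) (↑i) []) (↑j) (-1)
      = pvFindShiftA (PySem.List.pyGetD subtables (rem.getD i 0) [])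
          (PySem.List.pyGetD subtables (rem.getD j 0) []) ms := by
  unfold pvSimilarityMatrixA
  simp only [PySem.List.len_eq, List.length_map, PySem.List.pyRange_zero_natCast, List.map_map]
  rw [PySem.List.pyGetD_natCast (n := i), List.getD_eq_getElem _ _ (by simpa using hi), List.getElem_map,
      List.getElem_range]
  simp only [Function.comp_def]
  rw [PySem.List.pyGetD_natCast (n := j), List.getD_eq_getElem _ _ (by simpa using hj), List.getElem_map,
      List.getElem_range]
  simp only [PySem.List.pyGetD_natCast]
  rw [List.getD_eq_getElem _ _ (by simpa using hi), List.getElem_map,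
      List.getD_eq_getElem _ _ (by simpa using hj), List.getElem_map]
  rw [List.getD_eq_getElem _ _ hi, List.getD_eq_getElem _ _ hj]

-- A's first-strict-argmax index scan vs B's first-max element scan (max?)
theorem pv_argmax_rel (rem : List Int) (key : Int → Int) :
    ∀ (n s : Nat), s + n = rem.length → ∀ (i : Nat), i < rem.length →
    ∃ i', i' < rem.length ∧
      (List.range' s n).foldl
        (fun (acc : Int × Option Int) (k : Nat) =>
          if key (rem.getD k 0) > acc.1 then (key (rem.getD k 0), some (↑k : Int)) else acc)
        (key (rem.getD i 0), some (↑i : Int))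
        = (key (rem.getD i' 0), some (↑i' : Int)) ∧
      (rem.drop s).foldl
        (fun acc x => match acc with
          | none => some x
          | some m => if key m < key x then some x else some m)
        (some (rem.getD i 0))
        = some (rem.getD i' 0) := by
  intro n
  induction n with
  | zero =>
    intro s hs i hi
    refine ⟨i, hi, by simp, ?_⟩
    rw [List.drop_of_length_le (by omega)]
    simp
  | succ n ih =>
    intro s hs i hi
    have hsl : s < rem.length := by omega
    rw [List.range'_succ, List.drop_eq_getElem_cons hsl]
    simp only [List.foldl_cons]
    rw [← List.getD_eq_getElem rem 0 hsl]
    by_cases hgt : key (rem.getD s 0) > key (rem.getD i 0)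
    · simp only [hgt, if_pos, gt_iff_lt]
      obtain ⟨i', h1, h2, h3⟩ := ih (s+1) (by omega) s hsl
      exact ⟨i', h1, by simpa using h2, by simpa using h3⟩
    · have hng : ¬ (key (rem.getD i 0) < key (rem.getD s 0)) := by omega
      simp only [gt_iff_lt, if_neg hng]
      obtain ⟨i', h1, h2, h3⟩ := ih (s+1) (by omega) i hi
      exact ⟨i', h1, by simpa using h2, by simpa using h3⟩

-- A's single combined update/remove pass vs B's staged filter + pair fold
theorem pv_upd_rel (v : Int → Int) (ix : Int) :
    ∀ (rem : List Int) (t r acc : List Int),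
      rem.foldl (fun (s : List Int × List Int × List Int) g =>
          if v g ≠ -1 then
            (PySem.List.pySetD s.1 g ix, PySem.List.pySetD s.2.1 g (v g), s.2.2 ++ [g])
          else s) (t, r, acc)
        = (((rem.filter (fun g => decide (v g ≠ -1))).foldl
              (fun (s : List Int × List Int) g =>
                (PySem.List.pySetD s.1 g ix, PySem.List.pySetD s.2 g (v g))) (t, r)).1,
           ((rem.filter (fun g => decide (v g ≠ -1))).foldl
              (fun (s : List Int × List Int) g =>
                (PySem.List.pySetD s.1 g ix, PySem.List.pySetD s.2 g (v g))) (t, r)).2,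
           acc ++ rem.filter (fun g => decide (v g ≠ -1))) := by
  intro rem
  induction rem with
  | nil => intro t r acc; simp
  | cons x xs ih =>
    intro t r acc
    by_cases hx : v x ≠ -1
    · simpa [hx] using ih (PySem.List.pySetD t x ix) (PySem.List.pySetD r x (v x)) (acc ++ [x])
    · rw [not_ne_iff] at hx
      simpa [hx] using ih t r acc

theorem pv_filter_not_mem_filter (rem : List Int) (cond : Int → Bool) :
    rem.filter (fun g => !((rem.filter cond).contains g)) = rem.filter (fun g => !cond g) := by
  apply List.filter_congr
  intro g hg
  by_cases hc : cond g
  · simp [List.mem_filter, hg, hc]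
  · simp [List.mem_filter, hc]

-- the two loops coincide when sm is the global matrix and all rows have one length
theorem pv_loop_eq (subtables : List (List Int)) (ow ms : Int) (hms : 0 ≤ ms) (L : Nat)
    (hlen : ∀ st ∈ subtables, st.length = L) :
    ∀ (fuel : Nat) (rem : List Int) (ust : List (List Int)) (tidx trsh : List Int),
    (∀ g ∈ rem, 0 ≤ g ∧ g < (subtables.length : Int)) →
    pvLoopA subtables ow ms fuel rem ust tidx trsh
      = pvLoopB subtables (subtables.map (fun a => subtables.map (fun b => pvShiftOfB ms a b)))
          fuel rem ust tidx trsh := by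
  intro fuel
  induction fuel with
  | zero => intro rem ust tidx trsh _; rfl
  | succ fuel ih =>
    intro rem ust tidx trsh hrem
    cases rem with
    | nil => simp [pvLoopA, pvLoopB, PySem.List.max?]
    | cons x rs =>
      simp only [pvLoopA, pvLoopB]
      rw [if_neg (List.cons_ne_nil x rs)]
      simp only [PySem.List.len_eq, PySem.List.pyRange_zero_natCast, List.foldl_map, List.map_map]
      have hval : ∀ k : Nat, k < (x::rs).length →
          0 ≤ (x::rs).getD k 0 ∧ (x::rs).getD k 0 < (subtables.length : Int) := by
        intro k hk
        refine hrem _ ?_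
        rw [List.getD_eq_getElem _ _ hk]
        exact List.getElem_mem hk
      have hentry : ∀ k j : Nat, k < (x::rs).length → j < (x::rs).length →
          PySem.List.pyGetD (PySem.List.pyGetD
              (pvSimilarityMatrixA ((x::rs).map (fun g => PySem.List.pyGetD subtables g [])) ow ms) (↑k) []) (↑j) (-1)
          = PySem.List.pyGetD (PySem.List.pyGetD
              (subtables.map (fun a => subtables.map (fun b => pvShiftOfB ms a b)))
              ((x::rs).getD k 0) []) ((x::rs).getD j 0) (-1) := by
        intro k j hk hj
        have hk' := hval k hk
        have hj' := hval j hj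
        rw [pv_smL_entry subtables (x::rs) ow ms k j hk hj]
        rw [PySem.List.pyGetD_of_nonneg _ _ hk'.1, PySem.List.pyGetD_of_nonneg _ _ hj'.1]
        have hmemk : subtables.getD ((x::rs).getD k 0).toNat [] ∈ subtables := by
          rw [List.getD_eq_getElem _ _ (by omega)]
          exact List.getElem_mem (by omega)
        have hmemj : subtables.getD ((x::rs).getD j 0).toNat [] ∈ subtables := by
          rw [List.getD_eq_getElem _ _ (by omega)]
          exact List.getElem_mem (by omega)
        rw [pv_findshift_eq _ _ (by rw [hlen _ hmemk, hlen _ hmemj]) ms hms]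
        rw [← pv_smB_entry subtables ms _ _ hk' hj']
      set smG := subtables.map (fun a => subtables.map (fun b => pvShiftOfB ms a b)) with hsmG
      set smL := pvSimilarityMatrixA (List.map (fun g => PySem.List.pyGetD subtables g []) (x :: rs)) ow ms with hsmL
      set key := fun i : Int => ((((x::rs).filter (fun j =>
          decide (PySem.List.pyGetD (PySem.List.pyGetD smG i []) j (-1) ≠ -1))).length : Nat) : Int) with hkey
      have hkey0 : ∀ g : Int, 0 ≤ key g := by
        intro g
        rw [hkey]
        positivity
      have hcnt : ∀ k : Nat, k < (x::rs).length →
          ((List.range (x::rs).length).map ((fun j =>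
              if PySem.List.pyGetD (PySem.List.pyGetD smL (↑k) []) j (-1) ≠ -1 then (1:Int) else 0)
            ∘ fun k' : Nat => (↑k' : Int))).sum
          = key ((x::rs).getD k 0) := by
        intro k hk
        have hmc : List.map ((fun j =>
              if PySem.List.pyGetD (PySem.List.pyGetD smL (↑k) []) j (-1) ≠ -1 then (1:Int) else 0)
            ∘ fun k' : Nat => (↑k' : Int)) (List.range (x::rs).length)
            = List.map (fun j =>
              if PySem.List.pyGetD (PySem.List.pyGetD smG ((x::rs).getD k 0) [])
                  ((x::rs).getD j 0) (-1) ≠ -1 then (1:Int) else 0) (List.range (x::rs).length) := by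
          apply List.map_congr_left
          intro j hj
          simp only [Function.comp_def]
          rw [hentry k j hk (List.mem_range.1 hj)]
        rw [hmc]
        rw [pv_map_getD_range (x::rs) 0 (fun g =>
          if PySem.List.pyGetD (PySem.List.pyGetD smG ((x::rs).getD k 0) []) g (-1) ≠ -1 then (1:Int) else 0)]
        rw [pv_sum_ite_eq_filter_len (x::rs)
          (fun g => PySem.List.pyGetD (PySem.List.pyGetD smG ((x::rs).getD k 0) []) g (-1) ≠ -1)]
      have hfoldA : List.foldl
          (fun (acc : Int × Option Int) (y : Nat) =>
            if ((List.range (x :: rs).length).map ((fun j =>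
                if PySem.List.pyGetD (PySem.List.pyGetD smL (↑y) []) j (-1) ≠ -1 then (1:Int) else 0)
              ∘ fun k : Nat => (↑k : Int))).sum > acc.1 then
              (((List.range (x :: rs).length).map ((fun j =>
                if PySem.List.pyGetD (PySem.List.pyGetD smL (↑y) []) j (-1) ≠ -1 then (1:Int) else 0)
              ∘ fun k : Nat => (↑k : Int))).sum, some (↑y : Int))
            else acc) ((-1 : Int), (none : Option Int)) (List.range (x :: rs).length)
          = List.foldl (fun (acc : Int × Option Int) (k : Nat) =>
              if key ((x::rs).getD k 0) > acc.1 then (key ((x::rs).getD k 0), some (↑k : Int)) else acc)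
              ((-1 : Int), (none : Option Int)) (List.range (x :: rs).length) := by
        apply PySem.List.foldl_congr_mem
        intro acc k hkmem
        rw [hcnt k (List.mem_range.1 hkmem)]
      rw [hfoldA]
      rw [show List.range (x :: rs).length = 0 :: List.range' 1 rs.length from by
        rw [List.length_cons, List.range_eq_range', List.range'_succ]]
      rw [List.foldl_cons]
      have h0lt : (0:Nat) < (x :: rs).length := by simp
      rw [if_pos (show key ((x::rs).getD 0 0) > ((-1 : Int), (none : Option Int)).1 from
        lt_of_lt_of_le (show ((-1 : Int), (none : Option Int)).1 < 0 by norm_num) (hkey0 _))]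
      obtain ⟨i', hi', hA, hB⟩ := pv_argmax_rel (x :: rs) key rs.length 1 (by rw [List.length_cons]; omega) 0 h0lt
      rw [hA]
      have hmax : PySem.List.max? (x :: rs) key = some ((x :: rs).getD i' 0) := by
        simp only [List.drop_succ_cons, List.drop_zero, List.getD_cons_zero] at hB
        simp only [PySem.List.max?, List.foldl_cons]
        refine Eq.trans ?_ hB
        congr 1
        funext acc y
        cases acc <;> rfl
      rw [hmax]
      dsimp only
      have hgen : PySem.List.pyGetD (x :: rs) (↑i') 0 = (x :: rs).getD i' 0 :=
        PySem.List.pyGetD_natCast _ _ _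
      rw [hgen]
      have hupdA : List.foldl
          (fun (s : List Int × List Int × List Int) (p : Int × Int) =>
            if PySem.List.pyGetD (PySem.List.pyGetD smL (↑i' : Int) []) p.1 (-1) ≠ -1 then
              (PySem.List.pySetD s.1 p.2 (↑ust.length : Int),
                PySem.List.pySetD s.2.1 p.2 (PySem.List.pyGetD (PySem.List.pyGetD smL (↑i' : Int) []) p.1 (-1)),
                s.2.2 ++ [p.2])
            else s)
          (tidx, trsh, ([] : List Int)) (PySem.List.enumerate (x :: rs))
        = List.foldl
          (fun (s : List Int × List Int × List Int) (g : Int) =>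
            if PySem.List.pyGetD (PySem.List.pyGetD smG ((x :: rs).getD i' 0) []) g (-1) ≠ -1 then
              (PySem.List.pySetD s.1 g (↑ust.length : Int),
                PySem.List.pySetD s.2.1 g
                  (PySem.List.pyGetD (PySem.List.pyGetD smG ((x :: rs).getD i' 0) []) g (-1)),
                s.2.2 ++ [g])
            else s)
          (tidx, trsh, ([] : List Int)) (x :: rs) := by
        rw [PySem.List.enumerate_eq_map_pyRange (x :: rs) 0, PySem.List.len_eq,
            PySem.List.pyRange_zero_natCast, List.map_map, List.foldl_map]
        rw [PySem.List.foldl_congr_mem _ _ (fun (s : List Int × List Int × List Int) (j : Nat) =>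
            if PySem.List.pyGetD (PySem.List.pyGetD smG ((x :: rs).getD i' 0) [])
                ((x::rs).getD j 0) (-1) ≠ -1 then
              (PySem.List.pySetD s.1 ((x::rs).getD j 0) (↑ust.length : Int),
                PySem.List.pySetD s.2.1 ((x::rs).getD j 0)
                  (PySem.List.pyGetD (PySem.List.pyGetD smG ((x :: rs).getD i' 0) [])
                    ((x::rs).getD j 0) (-1)),
                s.2.2 ++ [(x::rs).getD j 0])
            else s) _ ?_]
        · exact pv_foldl_getD_range (x :: rs) 0
            (fun (s : List Int × List Int × List Int) (g : Int) =>
              if PySem.List.pyGetD (PySem.List.pyGetD smG ((x :: rs).getD i' 0) []) g (-1) ≠ -1 then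
                (PySem.List.pySetD s.1 g (↑ust.length : Int),
                  PySem.List.pySetD s.2.1 g
                    (PySem.List.pyGetD (PySem.List.pyGetD smG ((x :: rs).getD i' 0) []) g (-1)),
                  s.2.2 ++ [g])
              else s) (tidx, trsh, ([] : List Int))
        · intro acc j hj
          dsimp only [Function.comp_def]
          rw [PySem.List.pyGetD_natCast (xs := x :: rs) (n := j)]
          simp only [hentry i' j hi' (List.mem_range.1 hj)]
      rw [hupdA]
      rw [pv_upd_rel (fun g => PySem.List.pyGetD (PySem.List.pyGetD smG ((x :: rs).getD i' 0) []) g (-1))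
        ((↑ust.length : Int)) (x :: rs) tidx trsh []]
      simp only [List.nil_append]
      rw [pv_filter_not_mem_filter (x :: rs) (fun g =>
        decide (PySem.List.pyGetD (PySem.List.pyGetD smG ((x :: rs).getD i' 0) []) g (-1) ≠ -1))]
      rw [show (fun g => !decide (PySem.List.pyGetD (PySem.List.pyGetD smG ((x :: rs).getD i' 0) []) g (-1) ≠ -1))
            = (fun g => decide (PySem.List.pyGetD (PySem.List.pyGetD smG ((x :: rs).getD i' 0) []) g (-1) = -1)) from by
        funext g; simp [decide_not]]
      exact ih _ _ _ _ (fun g hg => hrem g (List.mem_of_mem_filter hg))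

-- B's front-peeling chunker = A's indexed slicing (on a list of length n * g)
theorem pv_chunks_eq (g : Nat) (hg : 0 < g) :
    ∀ (n : Nat) (l : List Int), l.length = n * g →
    pvChunksB g l = (List.range n).map (fun i => (l.drop (i * g)).take g) := by
  intro n
  induction n with
  | zero =>
    intro l hl
    have hnil : l = [] := List.length_eq_zero_iff.1 (by simpa using hl)
    subst hnil
    simp [pvChunksB]
  | succ n ih =>
    intro l hl
    have hpos : 0 < l.length := by rw [hl]; positivity
    cases l with
    | nil => simp at hpos
    | cons x xs =>
      rw [pvChunksB]
      have hdrop : xs.drop (g - 1) = (x :: xs).drop g := by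
        cases g with
        | zero => exact absurd hg (lt_irrefl 0)
        | succ g' => simp [List.drop_succ_cons]
      rw [hdrop]
      have hlen' : ((x :: xs).drop g).length = n * g := by
        rw [List.length_drop, hl]
        have : (n + 1) * g = n * g + g := by ring
        omega
      rw [ih _ hlen']
      rw [List.range_succ_eq_map, List.map_cons, List.map_map]
      congr 1
      · simp
      · apply List.map_congr_left
        intro i _
        simp only [Function.comp_def, List.drop_drop, Nat.succ_eq_add_one]
        congr 2
        ring

theorem pv_slice_len (values : List Int) (gN m : Nat) (hm : m = values.length / gN)
    (k : Nat) (hk : k < m) :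
    (PySem.List.slice values (some ((k : Int) * (gN : Int))) (some (((k : Int) + 1) * (gN : Int)))).length
      = gN := by
  have h1 : ((k : Int) + 1) * (gN : Int) = ((k * gN : Nat) : Int) + ((gN : Nat) : Int) := by
    push_cast; ring
  have h0 : (k : Int) * (gN : Int) = ((k * gN : Nat) : Int) := by push_cast; ring
  rw [h0, h1, PySem.List.slice_natCast_add, List.length_take, List.length_drop]
  have hle : m * gN ≤ values.length := by
    rw [hm]; exact Nat.div_mul_le_self _ _
  have hkk : (k + 1) * gN ≤ m * gN := Nat.mul_le_mul_right _ (by omega)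
  have : (k + 1) * gN = k * gN + gN := by ring
  omega

-- B's subtables expression = A's subtables expression
theorem pv_subtables_eq (values : List Int) (gN : Nat) (hg : 0 < gN) (m : Nat)
    (hm : m = values.length / gN) :
    pvChunksB gN (PySem.List.slice values none (some ((m : Int) * (gN : Int))))
      = (PySem.List.pyRange 0 ((m : Nat) : Int)).map
          (fun i => PySem.List.slice values (some (i * (gN : Int))) (some ((i + 1) * (gN : Int)))) := by
  have hle : m * gN ≤ values.length := by
    rw [hm]; exact Nat.div_mul_le_self _ _
  have h0 : (m : Int) * (gN : Int) = ((m * gN : Nat) : Int) := by push_cast; ring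
  rw [h0, PySem.List.slice_to _ (by positivity), Int.toNat_natCast]
  have hlen : (values.take (m * gN)).length = m * gN := by
    rw [List.length_take]; omega
  rw [pv_chunks_eq gN hg m _ hlen, PySem.List.pyRange_zero_natCast, List.map_map]
  apply List.map_congr_left
  intro k hk
  have hkm : k < m := List.mem_range.1 hk
  simp only [Function.comp_def]
  have h1 : ((k : Int) + 1) * (gN : Int) = ((k * gN : Nat) : Int) + ((gN : Nat) : Int) := by
    push_cast; ring
  have h2 : (k : Int) * (gN : Int) = ((k * gN : Nat) : Int) := by push_cast; ring
  rw [h1, h2, PySem.List.slice_natCast_add]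
  rw [List.drop_take, List.take_take]
  congr 1
  have hkk : (k + 1) * gN ≤ m * gN := Nat.mul_le_mul_right _ (by omega)
  have : (k + 1) * gN = k * gN + gN := by ring
  omega

-- ===== VERDICT (by name: the statement is the Claim_ definition above) =====
theorem cluster_subtables_py_spec : Claim_equal_cluster_subtables_py := by
  intro values ow ws ms _ hpre
  obtain ⟨hws, hor⟩ := hpre
  rcases hor with hms | hsmall
  case inr =>
    -- max_shift may be negative here, but there is no complete subtable: num_sub = 0,
    -- both loops get fuel 0 and an empty id list, and both return ([], [], [], group)
    unfold Spec_cluster_subtables_py cluster_subtables_py cluster_subtables_py_alt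
    dsimp only
    set gN : Nat := 1 <<< ws.toNat with hgN
    rw [PySem.List.len_eq, PySem.Int.floordiv_natCast]
    simp only [Int.toNat_natCast]
    have hm0 : values.length / gN = 0 := Nat.div_eq_of_lt (by exact_mod_cast hsmall)
    rw [hm0]
    simp [pvLoopA, pvLoopB]
  unfold Spec_cluster_subtables_py cluster_subtables_py cluster_subtables_py_alt
  dsimp only
  set gN : Nat := 1 <<< ws.toNat with hgN
  have hgpos : 0 < gN := by rw [hgN, Nat.one_shiftLeft]; positivity
  rw [PySem.List.len_eq, PySem.Int.floordiv_natCast]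
  simp only [Int.toNat_natCast]
  set m : Nat := values.length / gN with hm
  rw [pv_subtables_eq values gN hgpos m hm]
  rw [pv_loop_eq _ ow ms hms gN ?hl _ _ _ _ _ ?hv]
  case hl =>
    intro st hst
    rcases List.mem_map.1 hst with ⟨i, hi, rfl⟩
    rcases List.mem_map.1 (by
      rw [PySem.List.pyRange_zero_natCast] at hi; exact hi) with ⟨k, hk, rfl⟩
    exact pv_slice_len values gN m hm k (List.mem_range.1 hk)
  case hv =>
    intro g hgm
    have hgb := PySem.List.mem_pyRange_one.1 hgm
    refine ⟨hgb.1, ?_⟩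
    rw [List.length_map]
    rw [show ((PySem.List.pyRange 0 ((m : Nat) : Int)).length : Int) = ((m : Nat) : Int) from by
      rw [PySem.List.pyRange_zero_natCast, List.length_map, List.length_range]]
    exact hgb.2
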